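-- pv_equiv track=rewrite | github.com/stridera/fierylib | src/fierylib/converters/color_converter_v1_backup.py | strip_legacy_colors
-- ===== SOURCE A (Python) =====
-- def strip_legacy_colors(text: str) -> str:
--     """
--     Remove all legacy color codes from text
--
--     Args:
--         text: Text with legacy color codes
--
--     Returns:
--         Plain text without color codes
--
--     Examples:
--         >>> strip_legacy_colors("&1Red text&0")
--         'Red text'
--         >>> strip_legacy_colors("@RBright@0 text")
--         'Bright text'
--     """
--     if not text:
--         return text
--
--     # Remove all & and @ color codes (2 characters each)
--     result = []
--     i = 0
--
--     while i < len(text):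
--         char = text[i]
--
--         if char in ('&', '@') and i + 1 < len(text):
--             next_char = text[i + 1]
--
--             # Handle escapes - keep one character
--             if next_char == char:
--                 result.append(char)
--                 i += 2
--                 continue
--
--             # Handle newline &_
--             if char == '&' and next_char == '_':
--                 result.append('\n')
--                 i += 2
--                 continue
--
--             # Skip color code (both characters)
--             i += 2
--             continue
--
--         result.append(char)
--         i += 1
--
--     return ''.join(result)
-- ===== SOURCE B (Python) =====
-- def strip_legacy_colors(text: str) -> str:
--     """
--     Remove all legacy color codes from text (segment-copying rewrite:
--     jump from marker to marker with str.find instead of walking char by char).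
--     """
--     if not text:
--         return text
--
--     pieces = []
--     rest = text
--
--     while True:
--         # earliest '&' or '@' that still has a following character
--         cands = [x for x in (rest.find('&'), rest.find('@'))
--                  if x != -1 and x + 1 < len(rest)]
--         if not cands:
--             pieces.append(rest)
--             break
--         j = min(cands)
--         pieces.append(rest[:j])
--         g1, g2 = rest[j], rest[j + 1]
--         if g2 == g1:
--             pieces.append(g1)          # escaped marker: keep one
--         elif g1 == '&' and g2 == '_':
--             pieces.append('\n')        # &_ is a newline
--         rest = rest[j + 2:]
--
--     return ''.join(pieces)
-- ===== Notes on version B (the rewrite author's own statement) =====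
-- stated objective: faster
-- what changed: A walks the string one character at a time with an index state machine; B jumps from marker to marker with str.find and copies whole marker-free slices between matches, so the per-character work moves from the Python loop into C-level find/slice.
import Mathlib
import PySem

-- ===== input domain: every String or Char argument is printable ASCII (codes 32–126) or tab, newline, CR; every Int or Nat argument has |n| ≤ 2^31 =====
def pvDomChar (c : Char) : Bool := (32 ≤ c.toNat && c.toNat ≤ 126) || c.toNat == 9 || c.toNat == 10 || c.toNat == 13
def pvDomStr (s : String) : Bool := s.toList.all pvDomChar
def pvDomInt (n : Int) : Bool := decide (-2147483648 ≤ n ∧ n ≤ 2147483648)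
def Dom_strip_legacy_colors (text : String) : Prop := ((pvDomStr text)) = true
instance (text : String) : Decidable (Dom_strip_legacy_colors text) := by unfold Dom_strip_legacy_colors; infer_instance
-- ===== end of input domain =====

-- B replaces A's char-by-char index state machine by segment copying: str.find jumps
-- from marker to marker and whole marker-free slices are copied at once
-- (measured faster in a timing run: constant-factor, work moves into C-level find/slice).

-- ===== PORT A =====
-- A's while loop over the index i, transcribed as structural recursion on the char list:
-- each step consumes one char (append it) or two chars (escape / &_ / colour code).
def pvGoA : List Char → List Char
  | [] => []
  | c :: rest =>
    if c = '&' ∨ c = '@' then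
      match rest with
      | [] => c :: pvGoA []                 -- i + 1 < len fails: append char, i += 1
      | d :: rest' =>
        if d = c then c :: pvGoA rest'      -- escape: keep one char
        else if c = '&' ∧ d = '_' then '\n' :: pvGoA rest'  -- newline
        else pvGoA rest'                    -- skip colour code
    else c :: pvGoA rest

def strip_legacy_colors (text : String) : String :=
  if text = "" then text
  else String.mk (pvGoA text.toList)

-- ===== PORT B =====
-- helper lemmas cited by goB's termination proof (about PySem.Chars.find on a single char)
theorem pvSingletonPrefixDrop (l : List Char) (c : Char) (n : Nat) (hn : n < l.length) :
    ([c] <+: l.drop n) ↔ l[n] = c := by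
  rw [List.drop_eq_getElem_cons hn]
  constructor
  · rintro ⟨t, ht⟩; cases ht; rfl
  · intro h; exact ⟨l.drop (n + 1), by simp [h]⟩

-- find l [c] ≠ -1 → it is the first index of c
theorem pvFindcSpec (l : List Char) (c : Char) (h : PySem.Chars.find l [c] ≠ -1) :
    ∃ n : Nat, PySem.Chars.find l [c] = (n : Int) ∧ n < l.length ∧ l[n]! = c ∧
      ∀ i, i < n → ∀ hi : i < l.length, l[i] ≠ c := by
  have h0 : PySem.Chars.findFrom l [c] ((0 : Nat) : Int) = PySem.Chars.find l [c] := by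
    simpa using PySem.Chars.findFrom_zero l [c]
  have hs := PySem.Chars.findFrom_natCast_spec l [c] 0 (Nat.zero_le _) (by rw [h0]; exact h)
  rw [h0] at hs
  obtain ⟨hle, hpre, hmin⟩ := hs
  refine ⟨(PySem.Chars.find l [c]).toNat, ?_, ?_, ?_, ?_⟩
  · omega
  · -- the drop is nonempty since [c] is a prefix of it
    by_contra hge
    push_neg at hge
    rw [List.drop_eq_nil_of_le hge] at hpre
    exact (by simpa using hpre.length_le : ¬ (1 ≤ 0)) (by simpa using hpre.length_le)
  · have hlt : (PySem.Chars.find l [c]).toNat < l.length := by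
      by_contra hge
      push_neg at hge
      rw [List.drop_eq_nil_of_le hge] at hpre
      have := hpre.length_le; simp at this
    have := (pvSingletonPrefixDrop l c _ hlt).mp hpre
    simp [List.getElem!_eq_getElem?_getD, List.getElem?_eq_getElem hlt, this]
  · intro i hi hilen hic
    exact hmin i (Nat.zero_le _) hi ((pvSingletonPrefixDrop l c i hilen).mpr hic)

-- the candidate filter used by B:  x != -1 and x + 1 < len(rest)
def pvCand (l : List Char) (x : Int) : Bool := decide (x ≠ -1 ∧ x + 1 < PySem.List.len l)

def pvGoB (l : List Char) : List Char :=
  -- cands = [x for x in (rest.find('&'), rest.find('@')) if x != -1 and x + 1 < len(rest)]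
  match h : PySem.List.min?
      (([PySem.Chars.find l ['&'], PySem.Chars.find l ['@']]).filter (pvCand l))
      (fun x => x) with
  | none => l                               -- no candidate: append rest and stop
  | some j =>                               -- j = min(cands)
      PySem.List.slice l none (some j)
        ++ (if PySem.List.pyGetD l (j + 1) ' ' = PySem.List.pyGetD l j ' ' then
              [PySem.List.pyGetD l j ' ']
            else if PySem.List.pyGetD l j ' ' = '&' ∧ PySem.List.pyGetD l (j + 1) ' ' = '_' then
              ['\n']
            else [])
        ++ pvGoB (PySem.List.slice l (some (j + 2)) none)
termination_by l.length
decreasing_by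
  have hmem := PySem.List.min?_mem h
  rw [List.mem_filter] at hmem
  obtain ⟨hpair, hc⟩ := hmem
  simp only [pvCand, decide_eq_true_eq, PySem.List.len_eq] at hc
  have hfind : ∃ n : Nat, j = (n : Int) ∧ n + 1 < l.length := by
    have : j = PySem.Chars.find l ['&'] ∨ j = PySem.Chars.find l ['@'] := by simpa using hpair
    rcases this with hj | hj
    all_goals {
      obtain ⟨n, hn, -, -, -⟩ := pvFindcSpec l _ (hj ▸ hc.1)
      exact ⟨n, hj ▸ hn, by omega⟩ }
  obtain ⟨n, hn, hlen⟩ := hfind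
  have : (n : Int) + 2 = ((n + 2 : Nat) : Int) := by push_cast; ring
  rw [hn, this, PySem.List.slice_from_natCast]
  simp only [List.length_drop]
  omega

def strip_legacy_colors_alt (text : String) : String :=
  if text = "" then text
  else String.mk (pvGoB text.toList)

-- ===== PRECONDITION & SPEC =====
def Spec_strip_legacy_colors (text : String) (out : String) : Prop := out = strip_legacy_colors_alt text
instance (text : String) (out : String) : Decidable (Spec_strip_legacy_colors text out) := by unfold Spec_strip_legacy_colors; infer_instance

-- ===== CLAIM (what is proved, stated in full; the proofs are below) =====
def Claim_equal_strip_legacy_colors : Prop := ∀ (text : String), Dom_strip_legacy_colors text → Spec_strip_legacy_colors text (strip_legacy_colors text)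

-- ===== LEMMAS AND PROOFS =====

-- A's loop passes a marker-free prefix through unchanged
theorem pvGoA_cons_nonmark (c : Char) (rest : List Char) (hc : ¬(c = '&' ∨ c = '@')) :
    pvGoA (c :: rest) = c :: pvGoA rest := by
  cases rest <;> simp [pvGoA, hc]

theorem pvGoA_append (p s : List Char) (hp : ∀ c ∈ p, ¬(c = '&' ∨ c = '@')) :
    pvGoA (p ++ s) = p ++ pvGoA s := by
  induction p with
  | nil => rfl
  | cons c p ih =>
    rw [List.cons_append, pvGoA_cons_nonmark c _ (hp c (List.mem_cons_self ..)),
      ih (fun x hx => hp x (List.mem_cons_of_mem _ hx)), List.cons_append]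

-- A's loop on a marker with a successor consumes exactly two chars
theorem pvGoA_marker (c d : Char) (r : List Char) (hc : c = '&' ∨ c = '@') :
    pvGoA (c :: d :: r) =
      (if d = c then [c] else if c = '&' ∧ d = '_' then ['\n'] else []) ++ pvGoA r := by
  rw [pvGoA, if_pos hc]
  split_ifs <;> simp

-- if every marker sits at the very last index, A's loop is the identity
theorem pvGoA_id (l : List Char)
    (h : ∀ i, ∀ hi : i < l.length, (l[i] = '&' ∨ l[i] = '@') → i + 1 = l.length) :
    pvGoA l = l := by
  induction l with
  | nil => rfl
  | cons c rest ih =>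
    by_cases hc : c = '&' ∨ c = '@'
    · have h0 := h 0 (by simp) (by simpa using hc)
      have : rest = [] := by
        cases rest with
        | nil => rfl
        | cons _ _ => simp at h0
      subst this
      rw [pvGoA, if_pos hc]
      simp [pvGoA]
    · rw [pvGoA_cons_nonmark c _ hc, ih]
      intro i hi hm
      have := h (i + 1) (by simpa using Nat.succ_lt_succ hi) (by simpa using hm)
      simpa using this

-- if find l [c] is filtered out of the candidates then c occurs before index len-1 nowhere
theorem pvNoEarly (l : List Char) (c : Char) (n : Nat)
    (hub : PySem.Chars.find l [c] = -1 ∨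
           ∀ m : Nat, PySem.Chars.find l [c] = (m : Int) → n ≤ m)
    (i : Nat) (hi : i < n) (hilen : i < l.length) : l[i] ≠ c := by
  intro hic
  have hocc : PySem.Chars.find l [c] ≠ -1 := by
    rw [Ne, PySem.Chars.find_eq_neg_one_iff, List.singleton_infix_iff]
    intro hnot
    exact hnot (hic ▸ List.getElem_mem hilen)
  obtain ⟨m, hm, hmlen, hget, hmin⟩ := pvFindcSpec l c hocc
  rcases hub with h1 | h2
  · exact hocc h1
  · exact hmin i (by have := h2 m hm; omega) hilen hic

-- the main loop equivalence, by strong induction on the length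
theorem pvGoA_eq_goB : ∀ (N : Nat) (l : List Char), l.length ≤ N → pvGoA l = pvGoB l := by
  intro N
  induction N with
  | zero =>
    intro l hl
    have hnil : l = [] := by cases l <;> simp_all
    subst hnil
    rw [pvGoB]
    split
    · rfl
    · rename_i j h
      have hmem := PySem.List.min?_mem h
      have hfil : List.filter (pvCand ([] : List Char))
          [PySem.Chars.find ([] : List Char) ['&'], PySem.Chars.find ([] : List Char) ['@']]
          = [] := by decide
      rw [hfil] at hmem
      simp at hmem
  | succ N ih =>
    intro l hl
    rw [pvGoB]
    split
    · -- no candidate: cands = [], every marker occurrence is at the last index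
      rename_i h
      have hfil := (PySem.List.min?_eq_none_iff _ _).mp h
      rw [List.filter_eq_nil_iff] at hfil
      apply pvGoA_id
      intro i hi hm
      by_contra hne
      have hiub : i + 1 < l.length := by omega
      have hgen : ∀ c : Char, l[i] = c →
          ¬ pvCand l (PySem.Chars.find l [c]) = true → False := by
        intro c hic hcf
        have ho : PySem.Chars.find l [c] ≠ -1 := by
          rw [Ne, PySem.Chars.find_eq_neg_one_iff, List.singleton_infix_iff]
          intro hn; exact hn (hic ▸ List.getElem_mem hi)
        obtain ⟨m, hm', hmlen, hget, hmin⟩ := pvFindcSpec l c ho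
        simp only [pvCand, decide_eq_true_eq, PySem.List.len_eq, not_and, not_lt] at hcf
        have hub := hcf ho
        rw [hm'] at hub
        have hmi : m ≤ i := by
          by_contra hlt
          exact hmin i (by omega) hi hic
        have : (m : Int) + 1 ≤ (i : Int) + 1 := by exact_mod_cast by omega
        omega
      rcases hm with hc | hc
      · exact hgen '&' hc (hfil _ (by simp))
      · exact hgen '@' hc (hfil _ (by simp))
    · -- candidate j: decompose l = take n ++ l[n] :: l[n+1] :: drop (n+2)
      rename_i j h
      have hmem := PySem.List.min?_mem h
      rw [List.mem_filter] at hmem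
      obtain ⟨hpair, hcand⟩ := hmem
      rw [pvCand] at hcand
      simp only [decide_eq_true_eq, PySem.List.len_eq] at hcand
      have hpair' : j = PySem.Chars.find l ['&'] ∨ j = PySem.Chars.find l ['@'] := by
        simpa using hpair
      -- j is the first index of its own marker char
      have hself : ∃ (c₀ : Char) (n : Nat), (c₀ = '&' ∨ c₀ = '@') ∧ j = (n : Int) ∧
          n + 1 < l.length ∧ l[n]! = c₀ ∧ ∀ i, i < n → ∀ hi : i < l.length, l[i] ≠ c₀ := by
        rcases hpair' with hj | hj
        · obtain ⟨n, hn, hlen, hget, hmin⟩ := pvFindcSpec l '&' (hj ▸ hcand.1)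
          exact ⟨'&', n, Or.inl rfl, hj ▸ hn, by omega, hget, hmin⟩
        · obtain ⟨n, hn, hlen, hget, hmin⟩ := pvFindcSpec l '@' (hj ▸ hcand.1)
          exact ⟨'@', n, Or.inr rfl, hj ▸ hn, by omega, hget, hmin⟩
      obtain ⟨c₀, n, hc₀, hjn, hnlen, hget, hmin⟩ := hself
      have hn1 : n < l.length := by omega
      have hgetn : l[n] = c₀ := by
        simpa [List.getElem!_eq_getElem?_getD, List.getElem?_eq_getElem hn1] using hget
      -- nothing before n is a marker: its own find is minimal; the other marker's find
      -- is -1, or ≥ j in the candidate list, or filtered out because it sits at the end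
      have hclean : ∀ i, i < n → ∀ hi : i < l.length, ¬(l[i] = '&' ∨ l[i] = '@') := by
        intro i hi hilen
        have hone : ∀ c : Char, (c = '&' ∨ c = '@') → l[i] ≠ c := by
          intro c hcm
          by_cases hcc : c = c₀
          · subst hcc; exact hmin i hi hilen
          · apply pvNoEarly l c n _ i hi hilen
            by_cases hno : PySem.Chars.find l [c] = -1
            · exact Or.inl hno
            · right
              intro m hm
              by_cases hcf : pvCand l (PySem.Chars.find l [c]) = true
              · -- it is a candidate, so j ≤ find
                have hle := PySem.List.min?_isMin h (PySem.Chars.find l [c]) (by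
                  rw [List.mem_filter]
                  refine ⟨?_, hcf⟩
                  rcases hcm with rfl | rfl <;> simp)
                simp only at hle
                rw [hjn, hm] at hle
                exact_mod_cast hle
              · -- filtered out: find = m with m + 1 ≥ len, but n + 1 < len
                rw [pvCand] at hcf
                simp only [decide_eq_true_eq, PySem.List.len_eq] at hcf
                push_neg at hcf
                have := hcf hno
                rw [hm] at this
                omega
        rintro (hc | hc)
        · exact hone '&' (Or.inl rfl) hc
        · exact hone '@' (Or.inr rfl) hc
      -- decompose l
      have hn2 : n + 1 < l.length := hnlen
      have hdec : l = l.take n ++ l[n] :: l[n + 1] :: l.drop (n + 2) := by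
        conv_lhs => rw [← List.take_append_drop n l]
        rw [List.drop_eq_getElem_cons hn1, List.drop_eq_getElem_cons (by simpa using hn2)]
      -- compute the slices and gets on the B side
      have hjn1 : ((n : Int)) + 1 = ((n + 1 : Nat) : Int) := by push_cast; ring
      have hjn2 : ((n : Int)) + 2 = ((n + 2 : Nat) : Int) := by push_cast; ring
      have hg1 : PySem.List.pyGetD l ((n : Int)) ' ' = l[n] := by
        rw [PySem.List.pyGetD_natCast, List.getD_eq_getElem l ' ' hn1]
      have hg2 : PySem.List.pyGetD l ((n : Int) + 1) ' ' = l[n + 1] := by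
        rw [hjn1, PySem.List.pyGetD_natCast, List.getD_eq_getElem l ' ' hn2]
      rw [hjn, hjn2, PySem.List.slice_to_natCast, PySem.List.slice_from_natCast, hg1, hg2]
      -- and the A side
      conv_lhs => rw [hdec]
      rw [pvGoA_append _ _ (by
        intro c hcmem hm
        obtain ⟨i, hi, hieq⟩ := List.getElem_of_mem hcmem
        rw [List.getElem_take] at hieq
        have hi' : i < n ∧ i < l.length := by simpa using hi
        exact hclean i hi'.1 hi'.2 (hieq ▸ hm))]
      rw [pvGoA_marker _ _ _ (hgetn ▸ hc₀)]
      have hih := ih (l.drop (n + 2)) (by simp; omega)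
      rw [hih, List.append_assoc]
  termination_by N => N

-- ===== VERDICT (by name: the statement is the Claim_ definition above) =====
theorem strip_legacy_colors_spec : Claim_equal_strip_legacy_colors := by
  intro text _
  unfold Spec_strip_legacy_colors strip_legacy_colors strip_legacy_colors_alt
  by_cases h : text = ""
  · simp [h]
  · simp only [if_neg h]
    rw [pvGoA_eq_goB text.toList.length text.toList le_rfl]
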